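-- pv_equiv track=rewrite | github.com/RaphaelTusch/SWP-Python | testbeispiel_cicek.py | filter_missing_values
-- ===== SOURCE A (Python) =====
-- def filter_missing_values(temperatures):
--     if not temperatures:
--         return [], 0
--     cleaned = []
--     missing_count = 0
--
--     for t in temperatures:
--         if -60 <= t <= 60:
--             cleaned.append(t)
--         else:
--             missing_count += 1
--     return cleaned, missing_count
-- ===== SOURCE B (Python) =====
-- def filter_missing_values(temperatures):
--     # Divide and conquer: split in half, solve each half, merge the results.
--     def go(xs):
--         n = len(xs)
--         if n == 0:
--             return [], 0
--         if n == 1: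
--             t = xs[0]
--             return ([t], 0) if -60 <= t <= 60 else ([], 1)
--         mid = n // 2
--         c1, m1 = go(xs[:mid])
--         c2, m2 = go(xs[mid:])
--         return c1 + c2, m1 + m2
--     return go(temperatures)
-- ===== Notes on version B (the rewrite author's own statement) =====
-- stated objective: alternative
-- what changed: B replaces A's single linear scan with a running counter by a divide-and-conquer recursion: split the list in half, solve each half independently, and merge (cleaned1 + cleaned2, missing1 + missing2); the base cases are the empty and singleton lists.
import Mathlib
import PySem

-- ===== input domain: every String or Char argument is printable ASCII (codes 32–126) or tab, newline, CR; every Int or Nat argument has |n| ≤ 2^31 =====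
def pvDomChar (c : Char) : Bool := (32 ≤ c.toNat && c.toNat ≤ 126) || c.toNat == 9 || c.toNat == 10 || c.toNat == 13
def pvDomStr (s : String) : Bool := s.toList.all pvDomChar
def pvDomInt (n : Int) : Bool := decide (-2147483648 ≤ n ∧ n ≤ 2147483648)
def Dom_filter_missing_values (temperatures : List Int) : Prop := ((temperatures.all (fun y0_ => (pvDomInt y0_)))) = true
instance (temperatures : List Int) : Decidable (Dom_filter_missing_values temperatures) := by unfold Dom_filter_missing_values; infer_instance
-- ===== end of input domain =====

-- B replaces A's single counting scan by a divide-and-conquer recursion (halve, solve, merge); same return value, proved below.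

-- ===== PORT A =====
-- A: early return on empty list, then one loop appending in-range values and counting the rest.
def filter_missing_values (temperatures : List Int) : List Int × Int :=
  if temperatures = [] then ([], 0)
  else
    temperatures.foldl
      (fun (st : List Int × Int) t =>
        if -60 ≤ t ∧ t ≤ 60 then (st.1 ++ [t], st.2) else (st.1, st.2 + 1))
      ([], 0)

-- ===== PORT B =====
-- B's helper go: divide and conquer (xs[:mid] / xs[mid:] = take / drop at len/2).
def fmvGo : List Int → List Int × Int
  | [] => ([], 0)
  | [t] => if -60 ≤ t ∧ t ≤ 60 then ([t], 0) else ([], 1)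
  | a :: b :: rest =>
    let xs := a :: b :: rest
    let mid := xs.length / 2
    let r1 := fmvGo (xs.take mid)
    let r2 := fmvGo (xs.drop mid)
    (r1.1 ++ r2.1, r1.2 + r2.2)
termination_by xs => xs.length
decreasing_by
  · simp [List.length_take]; omega
  · simp [List.length_drop]; omega

def filter_missing_values_alt (temperatures : List Int) : List Int × Int :=
  fmvGo temperatures

-- ===== PRECONDITION & SPEC =====
def Spec_filter_missing_values (temperatures : List Int) (out : List Int × Int) : Prop := out = filter_missing_values_alt temperatures
instance (temperatures : List Int) (out : List Int × Int) : Decidable (Spec_filter_missing_values temperatures out) := by unfold Spec_filter_missing_values; infer_instance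

-- ===== CLAIM (what is proved, stated in full; the proofs are below) =====
def Claim_equal_filter_missing_values : Prop := ∀ (temperatures : List Int), Dom_filter_missing_values temperatures → Spec_filter_missing_values temperatures (filter_missing_values temperatures)

-- ===== LEMMAS AND PROOFS =====

-- A's loop computes (filter, length − kept length).
lemma fmv_fold (l acc : List Int) (c : Int) :
    l.foldl
      (fun (st : List Int × Int) t =>
        if -60 ≤ t ∧ t ≤ 60 then (st.1 ++ [t], st.2) else (st.1, st.2 + 1))
      (acc, c)
    = (acc ++ l.filter (fun t => decide (-60 ≤ t ∧ t ≤ 60)),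
       c + ((l.length : Int) - ((l.filter (fun t => decide (-60 ≤ t ∧ t ≤ 60))).length : Int))) := by
  induction l generalizing acc c with
  | nil => simp
  | cons h tl ih =>
    by_cases hp : -60 ≤ h ∧ h ≤ 60
    · simp [List.foldl, hp, ih]
    · simp [List.foldl, hp, ih]
      ring

-- B's divide-and-conquer computes the same pair (strong induction on length).
lemma fmvGo_eq_aux : ∀ (n : Nat) (xs : List Int), xs.length ≤ n →
    fmvGo xs = (xs.filter (fun t => decide (-60 ≤ t ∧ t ≤ 60)),
      (xs.length : Int) - ((xs.filter (fun t => decide (-60 ≤ t ∧ t ≤ 60))).length : Int)) := by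
  intro n
  induction n with
  | zero =>
    intro xs hxs
    have : xs = [] := List.length_eq_zero_iff.mp (Nat.le_zero.mp hxs)
    simp [this, fmvGo]
  | succ n ih =>
    intro xs hxs
    match xs with
    | [] => simp [fmvGo]
    | [t] => by_cases hp : -60 ≤ t ∧ t ≤ 60 <;> simp [fmvGo, hp]
    | a :: b :: rest =>
      have h1 : ((a :: b :: rest).take ((a :: b :: rest).length / 2)).length ≤ n := by
        simp only [List.length_take, List.length_cons] at *
        omega
      have h2 : ((a :: b :: rest).drop ((a :: b :: rest).length / 2)).length ≤ n := by
        simp only [List.length_drop, List.length_cons] at *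
        omega
      have ih1 := ih _ h1
      have ih2 := ih _ h2
      rw [fmvGo]
      simp only [ih1, ih2]
      have hsplit := List.take_append_drop ((a :: b :: rest).length / 2) (a :: b :: rest)
      rw [Prod.mk.injEq]
      constructor
      · conv_rhs => rw [← hsplit]
        rw [List.filter_append]
      · conv_rhs => rw [← hsplit]
        rw [List.filter_append, List.length_append, List.length_append]
        push_cast
        ring

lemma fmvGo_eq (xs : List Int) :
    fmvGo xs = (xs.filter (fun t => decide (-60 ≤ t ∧ t ≤ 60)),
      (xs.length : Int) - ((xs.filter (fun t => decide (-60 ≤ t ∧ t ≤ 60))).length : Int)) :=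
  fmvGo_eq_aux xs.length xs le_rfl

-- ===== VERDICT (by name: the statement is the Claim_ definition above) =====
theorem filter_missing_values_spec : Claim_equal_filter_missing_values := by
  intro temperatures _
  unfold Spec_filter_missing_values filter_missing_values filter_missing_values_alt
  rw [fmvGo_eq]
  by_cases h : temperatures = []
  · simp [h]
  · simp [h, fmv_fold]
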